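-- pv_equiv track=rewrite | github.com/studentsimon/binary_search | tests/binary_search.py | find_smallest_positive
-- ===== SOURCE A (Python) =====
-- def find_smallest_positive(xs):
--     '''
--     Assume that xs is a list of numbers sorted from LOWEST to HIGHEST.
--     Find the index of the smallest positive number.
--     If no such index exists, return `None`.
--     HINT:
--     This is essentially the binary search algorithm from class,
--     but you're always searching for 0.
--     >>> find_smallest_positive([-3, -2, -1, 0, 1, 2, 3])
--     4
--     >>> find_smallest_positive([1, 2, 3])
--     0
--     >>> find_smallest_positive([-3, -2, -1]) is None
--     True
--     '''
--     length = len(xs) #list length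
--     middle = length//2 #split
--
--     if length == 0:
--         return None
--
--     elif xs[middle] < 0:
--         if length == 1:
--             return None
--         else:
--             f1 = find_smallest_positive(xs[middle+1:])
--             if f1 == None:
--                 return None
--             else:
--                 return f1+middle+1
--     elif xs[middle] == 0:
--          return middle + 1
--     else:
--         if length == 1:
--             return 0
--         else:
--             if find_smallest_positive(xs[:middle])==None:
--                 return middle
--             else:
--                 return find_smallest_positive(xs[:middle])
-- ===== SOURCE B (Python) =====
-- def find_smallest_positive(xs):
--     # Index-bounded iterative binary search over [lo, hi); no slicing, no
--     # double recursion.  `ans` holds the pending answer a positive midpoint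
--     # would contribute if the left half yields nothing.
--     lo, hi, ans = 0, len(xs), None
--     while lo < hi:
--         mid = (lo + hi) // 2
--         v = xs[mid]
--         if v < 0:
--             if hi - lo == 1:
--                 return ans
--             lo = mid + 1
--         elif v == 0:
--             return mid + 1
--         else:
--             if hi - lo == 1:
--                 return lo
--             ans = mid
--             hi = mid
--     return ans
-- ===== Notes on version B (the rewrite author's own statement) =====
-- stated objective: faster
-- what changed: Replaced the double-recursive, list-slicing search by a single index-bounded loop over [lo,hi) with a pending-answer accumulator, removing all slice copies and the repeated left-half recursion.
import Mathlib
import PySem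

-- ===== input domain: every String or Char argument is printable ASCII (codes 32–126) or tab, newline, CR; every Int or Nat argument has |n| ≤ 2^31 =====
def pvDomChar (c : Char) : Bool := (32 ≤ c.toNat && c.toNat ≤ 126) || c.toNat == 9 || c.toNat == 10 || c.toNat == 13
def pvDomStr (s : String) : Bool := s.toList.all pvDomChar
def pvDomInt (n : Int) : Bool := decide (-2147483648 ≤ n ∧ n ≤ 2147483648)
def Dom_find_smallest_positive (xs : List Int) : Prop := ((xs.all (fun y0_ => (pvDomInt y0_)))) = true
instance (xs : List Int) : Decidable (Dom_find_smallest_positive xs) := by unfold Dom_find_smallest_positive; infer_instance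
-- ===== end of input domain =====

-- B replaces A's double-recursive, list-slicing search by one index-bounded binary-search loop with a pending-answer accumulator (no slice copies); objective: faster.

-- ===== PORT A =====
def find_smallest_positive (xs : List Int) : Option Int :=
  let length : Int := (xs.length : Int)
  let middle : Int := PySem.Int.floordiv length 2
  if length = 0 then none
  else if PySem.List.pyGetD xs middle 0 < 0 then
    if length = 1 then none
    else match find_smallest_positive (PySem.List.slice xs (some (middle + 1)) none) with
      | none => none
      | some f1 => some (f1 + middle + 1)
  else if PySem.List.pyGetD xs middle 0 = 0 then some (middle + 1)
  else
    if length = 1 then some 0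
    else
      if find_smallest_positive (PySem.List.slice xs none (some middle)) = none then some middle
      else find_smallest_positive (PySem.List.slice xs none (some middle))
termination_by xs.length
decreasing_by
  all_goals simp only [length, middle] at *
  all_goals rw [show PySem.Int.floordiv (↑xs.length) 2 = ((xs.length / 2 : Nat) : Int) from by exact_mod_cast PySem.Int.floordiv_natCast xs.length 2]
  · rw [show ((((xs.length / 2 : Nat) : Int)) + 1) = (((xs.length / 2 + 1 : Nat) : Int)) by push_cast; ring,
        PySem.List.slice_from_natCast]
    simp only [List.length_drop]; omega
  all_goals
    rw [PySem.List.slice_to_natCast]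
    simp only [List.length_take]; omega

-- ===== PORT B =====
-- goAlt is the Lean form of Source B's while-loop: state (lo, hi, ans), one step per iteration.
def goAlt (xs : List Int) (lo hi : Int) (ans : Option Int) : Option Int :=
  if lo < hi then
    let mid : Int := PySem.Int.floordiv (lo + hi) 2
    let v : Int := PySem.List.pyGetD xs mid 0
    if v < 0 then
      if hi - lo = 1 then ans else goAlt xs (mid + 1) hi ans
    else if v = 0 then some (mid + 1)
    else
      if hi - lo = 1 then some lo
      else goAlt xs lo mid (some mid)
  else ans
termination_by (hi - lo).toNat
decreasing_by
  all_goals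
    have h := PySem.Int.floordiv_two_mid_bounds (lo := lo) (hi := hi) (by omega)
    have h2 : PySem.Int.floordiv (lo + hi) 2 < hi := by
      rw [PySem.Int.floordiv_lt_iff_lt_mul (by omega)]; omega
    omega

def find_smallest_positive_alt (xs : List Int) : Option Int :=
  goAlt xs 0 (xs.length : Int) none

-- ===== PRECONDITION & SPEC =====
def Spec_find_smallest_positive (xs : List Int) (out : Option Int) : Prop := out = find_smallest_positive_alt xs
instance (xs : List Int) (out : Option Int) : Decidable (Spec_find_smallest_positive xs out) := by unfold Spec_find_smallest_positive; infer_instance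

-- ===== CLAIM (what is proved, stated in full; the proofs are below) =====
def Claim_equal_find_smallest_positive : Prop := ∀ (xs : List Int), Dom_find_smallest_positive xs → Spec_find_smallest_positive xs (find_smallest_positive xs)

-- ===== LEMMAS AND PROOFS =====

lemma goAlt_eq_slice (xs : List Int) : ∀ (n : Nat), ∀ (lo hi : Nat), ∀ (ans : Option Int),
    hi - lo = n → lo ≤ hi → hi ≤ xs.length →
    goAlt xs (lo : Int) (hi : Int) ans =
      (find_smallest_positive ((xs.drop lo).take (hi - lo))).elim ans (fun r => some (r + (lo : Int))) := by
  intro n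
  induction n using Nat.strong_induction_on with
  | _ n IH =>
  intro lo hi ans hn hle hhi
  by_cases h0 : hi = lo
  · subst h0
    rw [goAlt, find_smallest_positive]
    simp
  have hlt : lo < hi := lt_of_le_of_ne hle (Ne.symm h0)
  set seg : List Int := (xs.drop lo).take (hi - lo) with hsegdef
  have hseglen : seg.length = hi - lo := by
    simp [hsegdef]; omega
  set m : Nat := (hi - lo) / 2 with hmdef
  have hmlt : m < hi - lo := by omega
  have hmid : PySem.Int.floordiv ((lo : Int) + (hi : Int)) 2 = ((lo + m : Nat) : Int) := by
    rw [show ((lo : Int) + (hi : Int)) = (((lo + hi : Nat)) : Int) by push_cast; ring]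
    rw [show PySem.Int.floordiv (((lo + hi : Nat)) : Int) 2 = (((lo + hi) / 2 : Nat) : Int) from by
      exact_mod_cast PySem.Int.floordiv_natCast (lo + hi) 2]
    congr 1
    omega
  have hmiddle : PySem.Int.floordiv (((hi - lo : Nat)) : Int) 2 = ((m : Nat) : Int) := by
    rw [show PySem.Int.floordiv (((hi - lo : Nat)) : Int) 2 = (((hi - lo) / 2 : Nat) : Int) from by
      exact_mod_cast PySem.Int.floordiv_natCast (hi - lo) 2]
  have helem : PySem.List.pyGetD seg ((m : Nat) : Int) 0 = xs[lo + m]'(by omega) := by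
    rw [PySem.List.pyGetD_natCast]
    rw [List.getD_eq_getElem seg 0 (by omega)]
    simp [hsegdef, List.getElem_take, List.getElem_drop]
  have helem' : PySem.List.pyGetD xs (((lo + m : Nat)) : Int) 0 = xs[lo + m]'(by omega) := by
    rw [PySem.List.pyGetD_natCast]
    rw [List.getD_eq_getElem xs 0 (by omega)]
  rw [goAlt, find_smallest_positive]
  simp only [hseglen, hmiddle, hmid, helem, helem']
  have hlt' : ((lo : Int)) < ((hi : Int)) := by exact_mod_cast hlt
  rw [if_pos hlt']
  have hne0 : ¬ (((hi - lo : Nat) : Int) = 0) := by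
    simp; omega
  rw [if_neg hne0]
  by_cases hneg : xs[lo + m]'(by omega) < 0
  · rw [if_pos hneg, if_pos hneg]
    by_cases h1 : hi - lo = 1
    · rw [if_pos (by omega : (hi:Int) - (lo:Int) = 1), if_pos (by exact_mod_cast h1)]
      simp
    · rw [if_neg (by omega : ¬ ((hi:Int) - (lo:Int) = 1)), if_neg (by
        simpa using (by omega : ¬ ((hi - lo : Nat) = 1)))]
      -- right slice: seg[m+1:] = (xs.drop (lo+m+1)).take (hi - (lo+m+1))
      have hslice : PySem.List.slice seg (some (((m : Nat) : Int) + 1)) none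
          = (xs.drop (lo + m + 1)).take (hi - (lo + m + 1)) := by
        rw [show (((m : Nat) : Int) + 1) = (((m + 1 : Nat)) : Int) by push_cast; ring]
        rw [PySem.List.slice_from_natCast]
        rw [hsegdef, List.drop_take, List.drop_drop]
        congr 1; omega
      have hIH := IH (hi - (lo + m + 1)) (by omega) (lo + m + 1) hi ans rfl (by omega) hhi
      rw [show (((lo + m : Nat) : Int) + 1) = (((lo + m + 1 : Nat)) : Int) by push_cast; ring]
      rw [hIH, hslice]
      cases find_smallest_positive ((xs.drop (lo + m + 1)).take (hi - (lo + m + 1))) with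
      | none => simp
      | some r => simp; ring
  · rw [if_neg hneg, if_neg hneg]
    by_cases hz : xs[lo + m]'(by omega) = 0
    · rw [if_pos hz, if_pos hz]
      simp; ring
    · rw [if_neg hz, if_neg hz]
      by_cases h1 : hi - lo = 1
      · rw [if_pos (by omega : (hi:Int) - (lo:Int) = 1), if_pos (by exact_mod_cast h1)]
        simp
      · rw [if_neg (by omega : ¬ ((hi:Int) - (lo:Int) = 1)), if_neg (by
          simpa using (by omega : ¬ ((hi - lo : Nat) = 1)))]
        -- left slice: seg[:m] = (xs.drop lo).take m
        have hslice : PySem.List.slice seg none (some ((m : Nat) : Int))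
            = (xs.drop lo).take m := by
          rw [PySem.List.slice_to_natCast]
          rw [hsegdef, List.take_take]
          congr 1
          omega
        have htake : (xs.drop lo).take m = (xs.drop lo).take (lo + m - lo) := by congr 1; omega
        have hIH := IH m (by omega) lo (lo + m) (some ((lo + m : Nat) : Int)) (by omega) (by omega) (by omega)
        rw [htake] at hslice
        rw [hIH, hslice]
        cases find_smallest_positive ((xs.drop lo).take (lo + m - lo)) with
        | none => simp; ring
        | some r => simp

theorem find_smallest_positive_spec_aux (xs : List Int) :
    find_smallest_positive xs = find_smallest_positive_alt xs := by
  unfold find_smallest_positive_alt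
  have h := goAlt_eq_slice xs (xs.length) 0 (xs.length) none (by omega) (by omega) (by omega)
  rw [show ((0 : Nat) : Int) = (0 : Int) by norm_num] at h
  rw [h]
  simp only [List.drop_zero, Nat.sub_zero, List.take_length]
  cases find_smallest_positive xs with
  | none => simp
  | some r => simp

-- ===== VERDICT (by name: the statement is the Claim_ definition above) =====
theorem find_smallest_positive_spec : Claim_equal_find_smallest_positive := by
  intro xs _
  unfold Spec_find_smallest_positive
  exact find_smallest_positive_spec_aux xs
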